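-- pv_equiv track=rewrite | github.com/delmic/odemis | plugins/spectrum_arbscor.py | _scan_order_mxn
-- ===== SOURCE A (Python) =====
-- from typing import Tuple, List
--
-- def _scan_order_mxn(rep: Tuple[int, int], skip: Tuple[int, int]) -> List[Tuple[int, int]]:
--     """
--     Scan every MxN pixels, and then restart, but from the next point (+1 in X, then +1 in Y)
--     in the MxN initial area.
--     skip: Tuple of 2 integers, the number of pixels to skip in X and Y between each point
--     See _get_scan_order() for the "rep" parameter documentation
--     """
--     order = []
--     # 3x3 base
--     for y_base in range(skip[1]):
--         for x_base in range(skip[0]):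
--             # Every 3rd pixel (within the repetition)
--             for j in range(y_base, rep[1], skip[1]):  # Y slow
--                 for i in range(x_base, rep[0], skip[0]):  # X fast
--                     order.append((i, j))
--
--     return order
-- ===== SOURCE B (Python) =====
-- from typing import Tuple, List
--
-- def _scan_order_mxn(rep: Tuple[int, int], skip: Tuple[int, int]) -> List[Tuple[int, int]]:
--     """Same scan order as the nested-loop version, computed as one sort:
--     every pixel is keyed by (its residue block in Y, residue block in X, Y, X)."""
--     if skip[0] <= 0 or skip[1] <= 0:
--         return []
--     pixels = [(i, j) for j in range(rep[1]) for i in range(rep[0])]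
--     pixels.sort(key=lambda p: (p[1] % skip[1], p[0] % skip[0], p[1], p[0]))
--     return pixels
-- ===== Notes on version B (the rewrite author's own statement) =====
-- stated objective: alternative
-- what changed: Replaces the four nested stepping loops (residue base loops outside, strided pixel loops inside) by a single enumeration of all grid pixels followed by one stable sort on the key (y%skip_y, x%skip_x, y, x), with an up-front empty result when a skip component is not positive.
import Mathlib
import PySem

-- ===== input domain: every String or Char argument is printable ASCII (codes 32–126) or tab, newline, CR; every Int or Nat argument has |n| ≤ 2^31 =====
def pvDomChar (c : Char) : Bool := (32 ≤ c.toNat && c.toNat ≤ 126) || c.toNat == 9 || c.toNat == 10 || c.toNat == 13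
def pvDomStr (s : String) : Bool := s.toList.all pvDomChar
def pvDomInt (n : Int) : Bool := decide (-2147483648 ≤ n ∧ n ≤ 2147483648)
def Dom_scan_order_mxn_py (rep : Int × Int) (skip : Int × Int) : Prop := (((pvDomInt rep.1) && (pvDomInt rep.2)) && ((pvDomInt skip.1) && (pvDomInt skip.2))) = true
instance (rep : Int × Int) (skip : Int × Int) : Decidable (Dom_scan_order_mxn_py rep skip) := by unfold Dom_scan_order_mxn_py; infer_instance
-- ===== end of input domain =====

-- B replaces A's four nested stepping loops with one enumeration of the grid plus one keyed sort (alternative decomposition, same result).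

-- ===== PORT A =====
-- literal transliteration of the four nested append loops of _scan_order_mxn
def scan_order_mxn_py (rep : Int × Int) (skip : Int × Int) : List (Int × Int) :=
  (PySem.List.pyRange 0 skip.2 1).foldl (fun order y_base =>
    (PySem.List.pyRange 0 skip.1 1).foldl (fun order x_base =>
      (PySem.List.pyRange y_base rep.2 skip.2).foldl (fun order j =>
        (PySem.List.pyRange x_base rep.1 skip.1).foldl (fun order i =>
          order ++ [(i, j)]) order) order) order) []

-- ===== PORT B =====
-- the Python tuple key (j % skip_y, i % skip_x, j, i); tuple comparison = lexicographic order
def pvKey (skip : Int × Int) (p : Int × Int) : Int ×ₗ (Int ×ₗ (Int ×ₗ Int)) :=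
  toLex (PySem.Int.mod p.2 skip.2, toLex (PySem.Int.mod p.1 skip.1, toLex (p.2, p.1)))

def scan_order_mxn_py_alt (rep : Int × Int) (skip : Int × Int) : List (Int × Int) :=
  if skip.1 ≤ 0 ∨ skip.2 ≤ 0 then []
  else
    PySem.List.sorted
      ((PySem.List.pyRange 0 rep.2 1).flatMap (fun j =>
        (PySem.List.pyRange 0 rep.1 1).map (fun i => (i, j))))
      (pvKey skip)

-- ===== PRECONDITION & SPEC =====
def Spec_scan_order_mxn_py (rep : Int × Int) (skip : Int × Int) (out : List (Int × Int)) : Prop := out = scan_order_mxn_py_alt rep skip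
instance (rep : Int × Int) (skip : Int × Int) (out : List (Int × Int)) : Decidable (Spec_scan_order_mxn_py rep skip out) := by unfold Spec_scan_order_mxn_py; infer_instance

-- ===== CLAIM (what is proved, stated in full; the proofs are below) =====
def Claim_equal_scan_order_mxn_py : Prop := ∀ (rep : Int × Int) (skip : Int × Int), Dom_scan_order_mxn_py rep skip → Spec_scan_order_mxn_py rep skip (scan_order_mxn_py rep skip)

-- ===== LEMMAS AND PROOFS =====

-- the grid enumeration B sorts
def pvGrid (rep : Int × Int) : List (Int × Int) :=
  (PySem.List.pyRange 0 rep.2 1).flatMap (fun j =>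
    (PySem.List.pyRange 0 rep.1 1).map (fun i => (i, j)))

-- A, with its append-folds rewritten as nested flatMaps
def pvBlocks (rep : Int × Int) (skip : Int × Int) : List (Int × Int) :=
  (PySem.List.pyRange 0 skip.2 1).flatMap (fun y_base =>
    (PySem.List.pyRange 0 skip.1 1).flatMap (fun x_base =>
      (PySem.List.pyRange y_base rep.2 skip.2).flatMap (fun j =>
        (PySem.List.pyRange x_base rep.1 skip.1).map (fun i => (i, j)))))

theorem pvA_eq_blocks (rep skip : Int × Int) :
    scan_order_mxn_py rep skip = pvBlocks rep skip := by
  simp only [scan_order_mxn_py, pvBlocks, PySem.List.foldl_append_singleton_eq_map,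
    PySem.List.foldl_append_eq_flatMap, List.nil_append]

theorem pv_pairwise_lt_pyRange_pos (a b : Int) {s : Int} (hs : 0 < s) :
    (PySem.List.pyRange a b s).Pairwise (· < ·) := by
  rw [PySem.List.pyRange_of_pos a b hs]
  exact List.pairwise_lt_range.map _ (fun k k' hk => by nlinarith)

theorem pv_mod_eq_base {s a j : Int} (h0 : 0 ≤ a) (hs : a < s) (hd : s ∣ j - a) :
    j % s = a := by
  have : j % s = a % s := Int.emod_eq_emod_iff_emod_sub_eq_zero.mpr (Int.emod_eq_zero_of_dvd hd)
  rwa [Int.emod_eq_of_lt h0 hs] at this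

theorem pv_key_lt (skip : Int × Int) (hs1 : 0 < skip.1) (hs2 : 0 < skip.2) (p q : Int × Int)
    (h : p.2 % skip.2 < q.2 % skip.2 ∨ (p.2 % skip.2 = q.2 % skip.2 ∧
         (p.1 % skip.1 < q.1 % skip.1 ∨ (p.1 % skip.1 = q.1 % skip.1 ∧
         (p.2 < q.2 ∨ (p.2 = q.2 ∧ p.1 < q.1)))))) :
    pvKey skip p < pvKey skip q := by
  simp only [pvKey, PySem.Int.mod_eq_emod_of_pos hs1, PySem.Int.mod_eq_emod_of_pos hs2,
    Prod.Lex.toLex_lt_toLex]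
  exact h

-- A's flattened form is strictly increasing in B's sort key
theorem pv_blocks_pairwise (rep skip : Int × Int) (hs1 : 0 < skip.1) (hs2 : 0 < skip.2) :
    (pvBlocks rep skip).Pairwise (fun p q => pvKey skip p < pvKey skip q) := by
  unfold pvBlocks
  rw [List.pairwise_flatMap]
  constructor
  · intro yb hyb
    obtain ⟨hyb0, hybs⟩ := PySem.List.mem_pyRange_one.mp hyb
    rw [List.pairwise_flatMap]
    constructor
    · intro xb hxb
      obtain ⟨hxb0, hxbs⟩ := PySem.List.mem_pyRange_one.mp hxb
      rw [List.pairwise_flatMap]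
      constructor
      · intro j hj
        obtain ⟨_, _, hjd⟩ := (PySem.List.mem_pyRange_iff_of_pos hs2 j).mp hj
        rw [List.pairwise_map]
        refine (pv_pairwise_lt_pyRange_pos xb rep.1 hs1).imp_of_mem ?_
        intro i1 i2 h1 h2 hlt
        obtain ⟨_, _, hd1⟩ := (PySem.List.mem_pyRange_iff_of_pos hs1 i1).mp h1
        obtain ⟨_, _, hd2⟩ := (PySem.List.mem_pyRange_iff_of_pos hs1 i2).mp h2
        refine pv_key_lt skip hs1 hs2 (i1, j) (i2, j) (Or.inr ⟨rfl, Or.inr ⟨?_, Or.inr ⟨rfl, hlt⟩⟩⟩)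
        rw [pv_mod_eq_base hxb0 hxbs hd1, pv_mod_eq_base hxb0 hxbs hd2]
      · refine (pv_pairwise_lt_pyRange_pos yb rep.2 hs2).imp_of_mem ?_
        intro j1 j2 hj1 hj2 hlt x hx y hy
        obtain ⟨i1, hi1, rfl⟩ := List.mem_map.mp hx
        obtain ⟨i2, hi2, rfl⟩ := List.mem_map.mp hy
        obtain ⟨_, _, hjd1⟩ := (PySem.List.mem_pyRange_iff_of_pos hs2 j1).mp hj1
        obtain ⟨_, _, hjd2⟩ := (PySem.List.mem_pyRange_iff_of_pos hs2 j2).mp hj2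
        obtain ⟨_, _, hid1⟩ := (PySem.List.mem_pyRange_iff_of_pos hs1 i1).mp hi1
        obtain ⟨_, _, hid2⟩ := (PySem.List.mem_pyRange_iff_of_pos hs1 i2).mp hi2
        refine pv_key_lt skip hs1 hs2 (i1, j1) (i2, j2) (Or.inr ⟨?_, Or.inr ⟨?_, Or.inl hlt⟩⟩)
        · rw [pv_mod_eq_base hyb0 hybs hjd1, pv_mod_eq_base hyb0 hybs hjd2]
        · rw [pv_mod_eq_base hxb0 hxbs hid1, pv_mod_eq_base hxb0 hxbs hid2]
    · refine (PySem.List.pairwise_lt_pyRange_one 0 skip.1).imp_of_mem ?_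
      intro xb1 xb2 hx1 hx2 hlt x hx y hy
      obtain ⟨hxb01, hxbs1⟩ := PySem.List.mem_pyRange_one.mp hx1
      obtain ⟨hxb02, hxbs2⟩ := PySem.List.mem_pyRange_one.mp hx2
      obtain ⟨j1, hj1, hx'⟩ := List.mem_flatMap.mp hx
      obtain ⟨i1, hi1, rfl⟩ := List.mem_map.mp hx'
      obtain ⟨j2, hj2, hy'⟩ := List.mem_flatMap.mp hy
      obtain ⟨i2, hi2, rfl⟩ := List.mem_map.mp hy'
      obtain ⟨_, _, hjd1⟩ := (PySem.List.mem_pyRange_iff_of_pos hs2 j1).mp hj1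
      obtain ⟨_, _, hjd2⟩ := (PySem.List.mem_pyRange_iff_of_pos hs2 j2).mp hj2
      obtain ⟨_, _, hid1⟩ := (PySem.List.mem_pyRange_iff_of_pos hs1 i1).mp hi1
      obtain ⟨_, _, hid2⟩ := (PySem.List.mem_pyRange_iff_of_pos hs1 i2).mp hi2
      refine pv_key_lt skip hs1 hs2 (i1, j1) (i2, j2) (Or.inr ⟨?_, Or.inl ?_⟩)
      · rw [pv_mod_eq_base hyb0 hybs hjd1, pv_mod_eq_base hyb0 hybs hjd2]
      · rw [pv_mod_eq_base hxb01 hxbs1 hid1, pv_mod_eq_base hxb02 hxbs2 hid2]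
        exact hlt
  · refine (PySem.List.pairwise_lt_pyRange_one 0 skip.2).imp_of_mem ?_
    intro yb1 yb2 hy1 hy2 hlt x hx y hy
    obtain ⟨hyb01, hybs1⟩ := PySem.List.mem_pyRange_one.mp hy1
    obtain ⟨hyb02, hybs2⟩ := PySem.List.mem_pyRange_one.mp hy2
    obtain ⟨xb1, hxb1, hx'⟩ := List.mem_flatMap.mp hx
    obtain ⟨j1, hj1, hx''⟩ := List.mem_flatMap.mp hx'
    obtain ⟨i1, _, rfl⟩ := List.mem_map.mp hx''
    obtain ⟨xb2, hxb2, hy'⟩ := List.mem_flatMap.mp hy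
    obtain ⟨j2, hj2, hy''⟩ := List.mem_flatMap.mp hy'
    obtain ⟨i2, _, rfl⟩ := List.mem_map.mp hy''
    obtain ⟨_, _, hjd1⟩ := (PySem.List.mem_pyRange_iff_of_pos hs2 j1).mp hj1
    obtain ⟨_, _, hjd2⟩ := (PySem.List.mem_pyRange_iff_of_pos hs2 j2).mp hj2
    refine pv_key_lt skip hs1 hs2 (i1, j1) (i2, j2) (Or.inl ?_)
    rw [pv_mod_eq_base hyb01 hybs1 hjd1, pv_mod_eq_base hyb02 hybs2 hjd2]
    exact hlt

-- membership in A's flattened form = being a grid pixel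
theorem pv_mem_blocks (rep skip : Int × Int) (hs1 : 0 < skip.1) (hs2 : 0 < skip.2)
    (p : Int × Int) :
    p ∈ pvBlocks rep skip ↔ (0 ≤ p.1 ∧ p.1 < rep.1 ∧ 0 ≤ p.2 ∧ p.2 < rep.2) := by
  unfold pvBlocks
  simp only [List.mem_flatMap, List.mem_map, PySem.List.mem_pyRange_one,
    PySem.List.mem_pyRange_iff_of_pos hs1, PySem.List.mem_pyRange_iff_of_pos hs2]
  constructor
  · rintro ⟨yb, hyb, xb, hxb, j, hj, i, hi, rfl⟩
    exact ⟨le_trans hxb.1 hi.1, hi.2.1, le_trans hyb.1 hj.1, hj.2.1⟩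
  · rintro ⟨h1, h2, h3, h4⟩
    have e2 := Int.mul_ediv_add_emod p.2 skip.2
    have e1 := Int.mul_ediv_add_emod p.1 skip.1
    have q2 : 0 ≤ p.2 / skip.2 := Int.ediv_nonneg h3 hs2.le
    have q1 : 0 ≤ p.1 / skip.1 := Int.ediv_nonneg h1 hs1.le
    have m2 : 0 ≤ skip.2 * (p.2 / skip.2) := mul_nonneg hs2.le q2
    have m1 : 0 ≤ skip.1 * (p.1 / skip.1) := mul_nonneg hs1.le q1
    refine ⟨p.2 % skip.2, ⟨Int.emod_nonneg _ hs2.ne', Int.emod_lt_of_pos _ hs2⟩,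
      p.1 % skip.1, ⟨Int.emod_nonneg _ hs1.ne', Int.emod_lt_of_pos _ hs1⟩,
      p.2, ⟨by linarith, h4, ⟨p.2 / skip.2, by linarith⟩⟩,
      p.1, ⟨by linarith, h2, ⟨p.1 / skip.1, by linarith⟩⟩, rfl⟩

theorem pv_mem_grid (rep : Int × Int) (p : Int × Int) :
    p ∈ pvGrid rep ↔ (0 ≤ p.1 ∧ p.1 < rep.1 ∧ 0 ≤ p.2 ∧ p.2 < rep.2) := by
  unfold pvGrid
  simp only [List.mem_flatMap, List.mem_map, PySem.List.mem_pyRange_one]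
  constructor
  · rintro ⟨j, hj, i, hi, rfl⟩
    exact ⟨hi.1, hi.2, hj.1, hj.2⟩
  · rintro ⟨h1, h2, h3, h4⟩
    exact ⟨p.2, ⟨h3, h4⟩, p.1, ⟨h1, h2⟩, rfl⟩

theorem pv_grid_nodup (rep : Int × Int) : (pvGrid rep).Nodup := by
  have hp : (pvGrid rep).Pairwise (fun p q => toLex (p.2, p.1) < toLex (q.2, q.1)) := by
    unfold pvGrid
    rw [List.pairwise_flatMap]
    constructor
    · intro j _
      rw [List.pairwise_map]
      refine (PySem.List.pairwise_lt_pyRange_one 0 rep.1).imp ?_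
      intro a b hab
      exact Prod.Lex.toLex_lt_toLex.mpr (Or.inr ⟨rfl, hab⟩)
    · refine (PySem.List.pairwise_lt_pyRange_one 0 rep.2).imp ?_
      intro j1 j2 h12 x hx y hy
      obtain ⟨i1, _, rfl⟩ := List.mem_map.mp hx
      obtain ⟨i2, _, rfl⟩ := List.mem_map.mp hy
      exact Prod.Lex.toLex_lt_toLex.mpr (Or.inl h12)
  exact hp.imp (fun h => by rintro rfl; exact lt_irrefl _ h)

theorem pv_blocks_perm_grid (rep skip : Int × Int) (hs1 : 0 < skip.1) (hs2 : 0 < skip.2) :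
    (pvBlocks rep skip).Perm (pvGrid rep) := by
  have hnd : (pvBlocks rep skip).Nodup :=
    (pv_blocks_pairwise rep skip hs1 hs2).imp (fun h => by rintro rfl; exact lt_irrefl _ h)
  rw [List.perm_ext_iff_of_nodup hnd (pv_grid_nodup rep)]
  intro a
  rw [pv_mem_blocks rep skip hs1 hs2, pv_mem_grid]

theorem pv_degenerate (rep skip : Int × Int) (h : skip.1 ≤ 0 ∨ skip.2 ≤ 0) :
    scan_order_mxn_py rep skip = [] := by
  rw [pvA_eq_blocks]
  rcases h with h | h
  · unfold pvBlocks
    rw [PySem.List.pyRange_one_eq_nil h]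
    simp
  · unfold pvBlocks
    rw [PySem.List.pyRange_one_eq_nil h]
    simp

-- ===== VERDICT (by name: the statement is the Claim_ definition above) =====
theorem scan_order_mxn_py_spec : Claim_equal_scan_order_mxn_py := by
  intro rep skip _
  show scan_order_mxn_py rep skip = scan_order_mxn_py_alt rep skip
  unfold scan_order_mxn_py_alt
  by_cases h : skip.1 ≤ 0 ∨ skip.2 ≤ 0
  · rw [if_pos h, pv_degenerate rep skip h]
  · push Not at h
    rw [if_neg (by push Not; exact h)]
    rw [pvA_eq_blocks]
    exact (PySem.List.sorted_eq_of_perm_of_pairwise_lt _ _ _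
      (pv_blocks_perm_grid rep skip h.1 h.2) (pv_blocks_pairwise rep skip h.1 h.2)).symm
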